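-- pv_equiv track=rewrite | github.com/stbrumme/leetcode | 3111.py | minRectanglesToCoverPoints
-- ===== SOURCE A (Python) =====
-- from typing import List
--
-- def minRectanglesToCoverPoints(points: List[List[int]], w: int) -> int:
--     result = 0
--
--     covered = -1 # all points with x <= covered are already part of a rectangle
--     for x, y in sorted(points): # y doesn't matter
--         if x > covered:
--             covered = x + w
--             result += 1
--
--     return result
-- ===== SOURCE B (Python) =====
-- def _first_above(xs, v, lo):
--     # first index >= lo whose value is strictly greater than v (xs sorted)
--     hi = len(xs)
--     while lo < hi:
--         mid = (lo + hi) // 2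
--         if xs[mid] <= v:
--             lo = mid + 1
--         else:
--             hi = mid
--     return lo
--
-- def minRectanglesToCoverPoints(points, w):
--     xs = sorted(p[0] for p in points)
--     result = 0
--     i = _first_above(xs, -1, 0)  # same initial threshold as the scan's covered = -1
--     while i < len(xs):
--         result += 1
--         i = _first_above(xs, xs[i] + w, i + 1)
--     return result
-- ===== Notes on version B (the rewrite author's own statement) =====
-- stated objective: alternative
-- what changed: B sorts only the x coordinates and counts rectangles by binary-search (hand-written bisect_right) jumps past each rectangle's right edge, instead of A's per-point scan-and-branch over the lexicographically sorted point list.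
import Mathlib
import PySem

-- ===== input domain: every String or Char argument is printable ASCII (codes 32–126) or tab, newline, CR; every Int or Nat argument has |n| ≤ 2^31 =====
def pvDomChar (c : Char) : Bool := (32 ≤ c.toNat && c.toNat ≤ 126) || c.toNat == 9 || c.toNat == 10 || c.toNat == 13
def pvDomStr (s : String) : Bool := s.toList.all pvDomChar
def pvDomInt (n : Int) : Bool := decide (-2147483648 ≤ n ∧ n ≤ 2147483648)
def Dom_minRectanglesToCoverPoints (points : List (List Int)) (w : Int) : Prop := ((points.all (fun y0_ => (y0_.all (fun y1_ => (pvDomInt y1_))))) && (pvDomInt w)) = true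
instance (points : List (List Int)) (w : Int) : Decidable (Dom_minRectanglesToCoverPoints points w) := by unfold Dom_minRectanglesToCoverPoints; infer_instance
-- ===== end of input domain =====

-- B sorts only the x coordinates and counts rectangles by binary-search jumps past each
-- rectangle's right edge (same initial threshold -1 as A's scan), instead of A's
-- per-point scan over the lexicographically sorted point list.

-- ===== PORT A =====
def minRectanglesToCoverPoints (points : List (List Int)) (w : Int) : Int :=
  ((PySem.List.sorted points (fun p => p) false).foldl
    (fun (st : Int × Int) p =>
      -- 'for x, y in …': x = first element of p (y unused); exact under Pre_ (every point has length 2)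
      let x := p.headD 0
      if st.1 < x then (x + w, st.2 + 1) else st) (-1, 0)).2

-- ===== PORT B =====
-- helper _first_above: binary search for the first index ≥ lo whose value exceeds v
-- (fuel = hi - lo bounds the iteration count; it only makes the loop structurally total)
def firstAboveLoop (xs : List Int) (v : Int) : Nat → Nat → Nat → Nat
  | lo, _, 0 => lo
  | lo, hi, fuel + 1 =>
    if lo < hi then
      if xs.getD ((lo + hi) / 2) 0 ≤ v then firstAboveLoop xs v ((lo + hi) / 2 + 1) hi fuel
      else firstAboveLoop xs v lo ((lo + hi) / 2) fuel
    else lo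

def firstAbove (xs : List Int) (v : Int) (lo : Nat) : Nat :=
  firstAboveLoop xs v lo xs.length (xs.length - lo)

-- the while loop of B (fuel = number of uncounted indices bounds the iteration count)
def altLoop (xs : List Int) (w : Int) : Nat → Nat → Int
  | _, 0 => 0
  | i, fuel + 1 =>
    if h : i < xs.length then
      1 + altLoop xs w (firstAbove xs (xs[i] + w) (i + 1)) fuel
    else 0

def minRectanglesToCoverPoints_alt (points : List (List Int)) (w : Int) : Int :=
  -- xs = sorted(p[0] for p in points); p[0] is exact under Pre_ (every point nonempty)
  let xs := PySem.List.sorted (points.map (fun p => p.headD 0)) (fun x => x) false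
  altLoop xs w (firstAbove xs (-1) 0) xs.length

-- ===== PRECONDITION & SPEC =====
-- Pre_: every point is a 2-element list [x, y] — A's 'for x, y in sorted(points)' raises
-- ValueError (unpacking) on any other shape; nothing else is excluded.
def Pre_minRectanglesToCoverPoints (points : List (List Int)) (w : Int) : Prop :=
  ∀ p ∈ points, p.length = 2
instance (points : List (List Int)) (w : Int) : Decidable (Pre_minRectanglesToCoverPoints points w) := by unfold Pre_minRectanglesToCoverPoints; infer_instance

def pvWitness_minRectanglesToCoverPoints : List (List Int) × Int := ([[0, 1], [3, 2]], 1)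

def Spec_minRectanglesToCoverPoints (points : List (List Int)) (w : Int) (out : Int) : Prop := out = minRectanglesToCoverPoints_alt points w
instance (points : List (List Int)) (w : Int) (out : Int) : Decidable (Spec_minRectanglesToCoverPoints points w out) := by unfold Spec_minRectanglesToCoverPoints; infer_instance

-- ===== CLAIM (what is proved, stated in full; the proofs are below) =====
def Claim_equal_minRectanglesToCoverPoints : Prop := ∀ (points : List (List Int)) (w : Int), Dom_minRectanglesToCoverPoints points w → Pre_minRectanglesToCoverPoints points w → Spec_minRectanglesToCoverPoints points w (minRectanglesToCoverPoints points w)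

-- ===== LEMMAS AND PROOFS =====

theorem le_firstAboveLoop (xs : List Int) (v : Int) :
    ∀ (fuel lo hi : Nat), lo ≤ firstAboveLoop xs v lo hi fuel := by
  intro fuel
  induction fuel with
  | zero => intro lo hi; exact le_refl lo
  | succ n ih =>
    intro lo hi
    rw [firstAboveLoop]
    by_cases h : lo < hi
    · rw [if_pos h]
      by_cases hc : xs.getD ((lo + hi) / 2) 0 ≤ v
      · rw [if_pos hc]
        have := ih ((lo + hi) / 2 + 1) hi
        omega
      · rw [if_neg hc]
        exact ih lo ((lo + hi) / 2)
    · rw [if_neg h]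

theorem le_firstAbove (xs : List Int) (v : Int) (lo : Nat) : lo ≤ firstAbove xs v lo :=
  le_firstAboveLoop xs v (xs.length - lo) lo xs.length

-- reference greedy on the sorted coordinate list: skip everything within x + w, recurse
def skipCount (w : Int) : List Int → Int
  | [] => 0
  | x :: rest => 1 + skipCount w (rest.dropWhile (fun a => decide (a ≤ x + w)))
termination_by l => l.length
decreasing_by
  have := List.length_dropWhile_le (fun a => decide (a ≤ x + w)) rest
  simp only [List.length_cons]; omega

theorem pairwise_mono (xs : List Int) (hs : xs.Pairwise (· ≤ ·)) (i j : Nat)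
    (hij : i ≤ j) (hj : j < xs.length) : xs[i]'(by omega) ≤ xs[j] := by
  rcases Nat.lt_or_ge i j with h | h
  · exact List.pairwise_iff_getElem.mp hs i j (by omega) hj h
  · have : i = j := by omega
    subst this; rfl

theorem dropWhile_drop_of_le (xs : List Int) (v : Int) :
    ∀ a b : Nat, a ≤ b → b ≤ xs.length →
    (∀ k (hk : k < xs.length), a ≤ k → k < b → xs[k] ≤ v) →
    (xs.drop a).dropWhile (fun t => decide (t ≤ v)) = (xs.drop b).dropWhile (fun t => decide (t ≤ v)) := by
  intro a b hab hb hall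
  induction hd : b - a generalizing a with
  | zero => have : a = b := by omega
            subst this; rfl
  | succ n ih =>
    have ha : a < xs.length := by omega
    rw [List.drop_eq_getElem_cons ha, List.dropWhile_cons]
    have : xs[a] ≤ v := hall a ha (le_refl a) (by omega)
    simp only [this, decide_true, if_true]
    exact ih (a + 1) (by omega) (fun k hk h1 h2 => hall k hk (by omega) h2) (by omega)

theorem firstAboveLoop_drop (xs : List Int) (v : Int) (hs : xs.Pairwise (· ≤ ·)) :
    ∀ fuel lo hi : Nat, hi - lo ≤ fuel → lo ≤ hi → hi ≤ xs.length →
    (∀ k (hk : k < xs.length), hi ≤ k → v < xs[k]) →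
    xs.drop (firstAboveLoop xs v lo hi fuel) = (xs.drop lo).dropWhile (fun t => decide (t ≤ v)) := by
  intro fuel
  induction fuel with
  | zero =>
    intro lo hi hd hab hb hall
    have : lo = hi := by omega
    subst this
    rw [firstAboveLoop]
    rcases Nat.lt_or_ge lo xs.length with h | h
    · have hv : v < xs[lo] := hall lo h (le_refl lo)
      have hf : decide (xs[lo] ≤ v) = false := by simp [not_le.mpr hv]
      rw [List.drop_eq_getElem_cons h, List.dropWhile_cons, hf]
      simp
    · simp [List.drop_eq_nil_iff.mpr (by omega)]
  | succ n ih =>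
    intro lo hi hd hab hb hall
    by_cases hlh' : lo < hi
    case neg =>
      have : lo = hi := by omega
      subst this
      rw [firstAboveLoop, if_neg (by omega)]
      rcases Nat.lt_or_ge lo xs.length with h | h
      · have hv : v < xs[lo] := hall lo h (le_refl lo)
        have hf : decide (xs[lo] ≤ v) = false := by simp [not_le.mpr hv]
        rw [List.drop_eq_getElem_cons h, List.dropWhile_cons, hf]
        simp
      · simp [List.drop_eq_nil_iff.mpr (by omega)]
    have hlh : lo < hi := hlh'
    have hm2 : (lo + hi) / 2 < hi := by omega
    have hm1 : lo ≤ (lo + hi) / 2 := by omega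
    have hmid : (lo + hi) / 2 < xs.length := by omega
    rw [firstAboveLoop, if_pos hlh]
    rw [List.getD_eq_getElem xs 0 hmid]
    by_cases hc : xs[(lo + hi) / 2] ≤ v
    · rw [if_pos hc]
      rw [ih ((lo + hi) / 2 + 1) hi (by omega) (by omega) hb hall]
      exact (dropWhile_drop_of_le xs v lo ((lo + hi) / 2 + 1) (by omega) (by omega)
        (fun k hk h1 h2 => le_trans (pairwise_mono xs hs k ((lo + hi) / 2) (by omega) hmid) hc)).symm
    · rw [if_neg hc]
      exact ih lo ((lo + hi) / 2) (by omega) (by omega) (by omega)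
        (fun k hk h1 => lt_of_lt_of_le (not_le.mp hc) (pairwise_mono xs hs ((lo + hi) / 2) k h1 hk))

theorem alt_eq_skip (xs : List Int) (w : Int) (hs : xs.Pairwise (· ≤ ·)) :
    ∀ fuel i : Nat, xs.length - i ≤ fuel → altLoop xs w i fuel = skipCount w (xs.drop i) := by
  intro fuel
  induction fuel with
  | zero =>
    intro i hd
    rw [altLoop, List.drop_eq_nil_iff.mpr (by omega)]
    simp [skipCount]
  | succ n ih =>
    intro i hd
    rw [altLoop]
    by_cases h : i < xs.length
    · rw [dif_pos h]
      have hj := le_firstAbove xs (xs[i] + w) (i + 1)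
      have hdrop : xs.drop (firstAbove xs (xs[i] + w) (i + 1))
          = (xs.drop (i + 1)).dropWhile (fun t => decide (t ≤ xs[i] + w)) :=
        firstAboveLoop_drop xs (xs[i] + w) hs (xs.length - (i + 1)) (i + 1) xs.length
          (le_refl _) (by omega) (le_refl _) (fun k hk hik => absurd hk (by omega))
      rw [ih _ (by omega), hdrop, List.drop_eq_getElem_cons h, skipCount]
    · rw [dif_neg h, List.drop_eq_nil_iff.mpr (by omega)]
      simp [skipCount]

theorem fold_eq_skip (w : Int) : ∀ (xs : List Int) (c r : Int),
    (xs.foldl (fun (st : Int × Int) x => if st.1 < x then (x + w, st.2 + 1) else st) (c, r)).2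
      = r + skipCount w (xs.dropWhile (fun a => decide (a ≤ c))) := by
  intro xs
  induction xs with
  | nil => intro c r; simp [skipCount]
  | cons x rest ih =>
    intro c r
    by_cases hx : c < x
    · have hf : decide (x ≤ c) = false := by simp [not_le.mpr hx]
      rw [List.foldl_cons, List.dropWhile_cons, hf]
      simp only [if_pos hx, Bool.false_eq_true, if_false]
      rw [ih (x + w) (r + 1), skipCount]
      ring
    · have ht : decide (x ≤ c) = true := by simp [not_lt.mp hx]
      rw [List.foldl_cons, List.dropWhile_cons, ht]
      simp only [if_neg hx, if_true]
      exact ih c r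

theorem sorted_ext {α κ : Type} (i1 i2 : LT κ) (d1 : @DecidableLT κ i1) (d2 : @DecidableLT κ i2)
    (h : ∀ a b : κ, @LT.lt κ i1 a b ↔ @LT.lt κ i2 a b) (xs : List α) (key : α → κ) :
    @PySem.List.sorted α κ i1 d1 xs key false = @PySem.List.sorted α κ i2 d2 xs key false := by
  rw [@PySem.List.sorted_eq_foldl_insertBy α κ i1 d1 xs key,
      @PySem.List.sorted_eq_foldl_insertBy α κ i2 d2 xs key]
  congr 1
  funext acc x
  congr 1
  funext a b
  exact decide_eq_decide.mpr (h (key a) (key b))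

-- Python compares lists lexicographically: core 'List.lt' and Mathlib's linear order agree
theorem sorted_core_eq (points : List (List Int)) :
    PySem.List.sorted points (fun p => p) false
      = @PySem.List.sorted (List Int) (List Int) (List.instLinearOrder.toLT) LinearOrder.toDecidableLT points (fun p => p) false :=
  sorted_ext _ _ _ _ (fun a b => List.lt_iff_lex_lt a b) points _

theorem head_le_of_list_le (p q : List Int) (hp : p ≠ []) (h : p ≤ q) :
    p.headD 0 ≤ q.headD 0 := by
  rcases lt_or_eq_of_le h with hlt | rfl
  · match p, q, hlt with
    | a :: l, b :: m, hlt => exact List.head_le_of_lt hlt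
  · rfl

-- sorting the x coordinates = taking the x coordinates of the lexicographically sorted points
theorem sorted_heads (points : List (List Int)) (hp : ∀ p ∈ points, p.length = 2) :
    PySem.List.sorted (points.map (fun p => p.headD 0)) (fun x => x) false
      = (@PySem.List.sorted (List Int) (List Int) (List.instLinearOrder.toLT) LinearOrder.toDecidableLT points (fun p => p) false).map (fun p => p.headD 0) := by
  apply PySem.List.sorted_id_eq_of_perm_of_pairwise
  · exact List.Perm.map _ (@PySem.List.sorted_perm (List Int) (List Int) (List.instLinearOrder.toLT) LinearOrder.toDecidableLT points (fun p => p) false)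
  · rw [List.pairwise_map]
    apply List.Pairwise.imp_of_mem ?_ (@PySem.List.sorted_pairwise (List Int) (List Int) List.instLinearOrder points (fun p => p))
    intro a b ha hb hab
    have h2 : a.length = 2 := hp a ((@PySem.List.mem_sorted (List Int) (List Int) (List.instLinearOrder.toLT) LinearOrder.toDecidableLT points (fun p => p) false a).mp ha)
    exact head_le_of_list_le a b (by intro he; simp [he] at h2) hab

-- ===== VERDICT (by name: the statement is the Claim_ definition above) =====
theorem minRectanglesToCoverPoints_spec : Claim_equal_minRectanglesToCoverPoints := by
  intro points w hdom hpre
  unfold Spec_minRectanglesToCoverPoints minRectanglesToCoverPoints minRectanglesToCoverPoints_alt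
  have hxs := (sorted_heads points hpre).symm
  rw [sorted_core_eq points]
  rw [show ((@PySem.List.sorted (List Int) (List Int) (List.instLinearOrder.toLT) LinearOrder.toDecidableLT points (fun p => p) false).foldl
      (fun (st : Int × Int) p => let x := p.headD 0; if st.1 < x then (x + w, st.2 + 1) else st) (-1, 0))
    = ((@PySem.List.sorted (List Int) (List Int) (List.instLinearOrder.toLT) LinearOrder.toDecidableLT points (fun p => p) false).map (fun p => p.headD 0)).foldl
      (fun (st : Int × Int) x => if st.1 < x then (x + w, st.2 + 1) else st) (-1, 0) from by rw [List.foldl_map]]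
  rw [hxs]
  have hpw : (PySem.List.sorted (points.map (fun p => p.headD 0)) (fun x => x) false).Pairwise (· ≤ ·) :=
    PySem.List.sorted_pairwise (points.map (fun p => p.headD 0)) (fun x => x)
  rw [fold_eq_skip w _ (-1) 0]
  rw [alt_eq_skip _ w hpw _ _ (by omega)]
  rw [show firstAbove (PySem.List.sorted (points.map (fun p => p.headD 0)) (fun x => x) false) (-1) 0
      = firstAboveLoop (PySem.List.sorted (points.map (fun p => p.headD 0)) (fun x => x) false) (-1) 0
          (PySem.List.sorted (points.map (fun p => p.headD 0)) (fun x => x) false).length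
          ((PySem.List.sorted (points.map (fun p => p.headD 0)) (fun x => x) false).length - 0) from rfl]
  rw [firstAboveLoop_drop _ (-1) hpw _ 0 _ (by omega) (by omega) (le_refl _) (fun k hk h0 => absurd hk (by omega))]
  simp
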